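-- pv_equiv track=rewrite | github.com/ChimeraMetta/Chimera | metta_generator/base.py | _detect_patterns_symbolically
-- ===== SOURCE A (Python) =====
-- from typing import Dict, List, Any, Optional, Union, Callable
--
-- def _detect_patterns_symbolically(facts: List[str]) -> List[str]:
--     """Symbolic pattern detection fallback."""
--     patterns = []
--
--     has_loop = any("has-loop-structure" in fact for fact in facts)
--     has_comparison = any("has-comparison-ops" in fact for fact in facts)
--     has_return = any("has-return" in fact for fact in facts)
--     calls_self = any("calls-self" in fact for fact in facts)
--
--     if has_loop and has_comparison and has_return:
--         patterns.append("search-pattern")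
--
--     if has_loop and not calls_self:
--         patterns.append("iterative-pattern")
--
--     if calls_self:
--         patterns.append("recursive-pattern")
--
--     return patterns
-- ===== SOURCE B (Python) =====
-- # Bitmask + decision-table formulation: one scan with early exit folds the
-- # facts into a 4-bit mask; a precomputed 16-entry table maps each mask to
-- # its pattern list (bit 1 = loop, 2 = comparison, 4 = return, 8 = calls-self).
-- _TABLE = [
--     [],                                        # 0
--     ["iterative-pattern"],                     # 1: loop
--     [],                                        # 2: comp
--     ["iterative-pattern"],                     # 3: loop,comp
--     [],                                        # 4: ret
--     ["iterative-pattern"],                     # 5: loop,ret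
--     [],                                        # 6: comp,ret
--     ["search-pattern", "iterative-pattern"],   # 7: loop,comp,ret
--     ["recursive-pattern"],                     # 8: self
--     ["recursive-pattern"],                     # 9
--     ["recursive-pattern"],                     # 10
--     ["recursive-pattern"],                     # 11
--     ["recursive-pattern"],                     # 12
--     ["recursive-pattern"],                     # 13
--     ["recursive-pattern"],                     # 14
--     ["search-pattern", "recursive-pattern"],   # 15
-- ]
--
-- def _detect_patterns_symbolically(facts):
--     mask = 0
--     for fact in facts:
--         if "has-loop-structure" in fact:
--             mask |= 1
--         if "has-comparison-ops" in fact: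
--             mask |= 2
--         if "has-return" in fact:
--             mask |= 4
--         if "calls-self" in fact:
--             mask |= 8
--         if mask == 15:
--             break
--     return list(_TABLE[mask])
-- ===== Notes on version B (the rewrite author's own statement) =====
-- stated objective: alternative
-- what changed: B folds the facts into a 4-bit presence mask in one scan with an early break once all bits are set, then returns the pattern list by indexing a precomputed 16-entry decision table instead of A's four separate any()-scans and conditional-append chain.
import Mathlib
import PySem

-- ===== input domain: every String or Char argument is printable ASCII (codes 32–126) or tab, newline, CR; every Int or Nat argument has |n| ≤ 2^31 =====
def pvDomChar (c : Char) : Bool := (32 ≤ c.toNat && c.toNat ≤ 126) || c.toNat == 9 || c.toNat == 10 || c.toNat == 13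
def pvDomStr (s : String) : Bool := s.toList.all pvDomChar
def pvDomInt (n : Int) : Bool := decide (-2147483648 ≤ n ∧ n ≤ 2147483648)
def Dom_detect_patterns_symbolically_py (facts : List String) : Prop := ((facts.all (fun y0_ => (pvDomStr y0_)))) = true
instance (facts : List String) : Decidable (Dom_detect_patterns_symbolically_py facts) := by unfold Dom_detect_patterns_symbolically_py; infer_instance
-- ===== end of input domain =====

-- B folds the facts into a 4-bit presence mask (early break once all bits set) and indexes a
-- precomputed 16-entry decision table, instead of A's four any()-scans and conditional-append chain.

-- ===== PORT A =====
def detect_patterns_symbolically_py (facts : List String) : List String :=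
  let patterns : List String := []
  let has_loop := facts.any (fun fact => PySem.Str.isIn "has-loop-structure" fact)
  let has_comparison := facts.any (fun fact => PySem.Str.isIn "has-comparison-ops" fact)
  let has_return := facts.any (fun fact => PySem.Str.isIn "has-return" fact)
  let calls_self := facts.any (fun fact => PySem.Str.isIn "calls-self" fact)
  let patterns := if has_loop && has_comparison && has_return then patterns ++ ["search-pattern"] else patterns
  let patterns := if has_loop && !calls_self then patterns ++ ["iterative-pattern"] else patterns
  let patterns := if calls_self then patterns ++ ["recursive-pattern"] else patterns
  patterns

-- ===== PORT B =====
-- the module-level 16-entry decision table _TABLE of Source B (bit 1 = loop, 2 = comparison, 4 = return, 8 = calls-self)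
def pvTable : List (List String) :=
  [ [],
    ["iterative-pattern"],
    [],
    ["iterative-pattern"],
    [],
    ["iterative-pattern"],
    [],
    ["search-pattern", "iterative-pattern"],
    ["recursive-pattern"],
    ["recursive-pattern"],
    ["recursive-pattern"],
    ["recursive-pattern"],
    ["recursive-pattern"],
    ["recursive-pattern"],
    ["recursive-pattern"],
    ["search-pattern", "recursive-pattern"] ]

-- one iteration of Source B's loop body: or the fact's marker bits into the mask
def pvStep (fact : String) (mask : Nat) : Nat :=
  let mask := if PySem.Str.isIn "has-loop-structure" fact then mask ||| 1 else mask
  let mask := if PySem.Str.isIn "has-comparison-ops" fact then mask ||| 2 else mask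
  let mask := if PySem.Str.isIn "has-return" fact then mask ||| 4 else mask
  let mask := if PySem.Str.isIn "calls-self" fact then mask ||| 8 else mask
  mask

-- Source B's loop: accumulate the mask over the facts, breaking once mask == 15
def pvScanMask : List String → Nat → Nat
  | [], mask => mask
  | fact :: rest, mask =>
    let mask := pvStep fact mask
    if mask == 15 then mask else pvScanMask rest mask

def detect_patterns_symbolically_py_alt (facts : List String) : List String :=
  pvTable.getD (pvScanMask facts 0) []

-- ===== PRECONDITION & SPEC =====
def Spec_detect_patterns_symbolically_py (facts : List String) (out : List String) : Prop := out = detect_patterns_symbolically_py_alt facts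
instance (facts : List String) (out : List String) : Decidable (Spec_detect_patterns_symbolically_py facts out) := by unfold Spec_detect_patterns_symbolically_py; infer_instance

-- ===== CLAIM (what is proved, stated in full; the proofs are below) =====
def Claim_equal_detect_patterns_symbolically_py : Prop := ∀ (facts : List String), Dom_detect_patterns_symbolically_py facts → Spec_detect_patterns_symbolically_py facts (detect_patterns_symbolically_py facts)

-- ===== LEMMAS AND PROOFS =====

-- the marker bits contributed by one fact
def pvBits (fact : String) : Nat :=
  (if PySem.Str.isIn "has-loop-structure" fact then 1 else 0) |||
  (if PySem.Str.isIn "has-comparison-ops" fact then 2 else 0) |||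
  (if PySem.Str.isIn "has-return" fact then 4 else 0) |||
  (if PySem.Str.isIn "calls-self" fact then 8 else 0)

-- the mask of a whole list without the early break, in terms of A's four any-scans
def pvMaskOf (facts : List String) : Nat :=
  (if facts.any (fun fact => PySem.Str.isIn "has-loop-structure" fact) then 1 else 0) |||
  (if facts.any (fun fact => PySem.Str.isIn "has-comparison-ops" fact) then 2 else 0) |||
  (if facts.any (fun fact => PySem.Str.isIn "has-return" fact) then 4 else 0) |||
  (if facts.any (fun fact => PySem.Str.isIn "calls-self" fact) then 8 else 0)

theorem pvStep_eq (f : String) (m : Nat) : pvStep f m = m ||| pvBits f := by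
  unfold pvStep pvBits
  split_ifs <;> simp [Nat.or_assoc]

theorem pvBits_le (f : String) : pvBits f ≤ 15 := by
  unfold pvBits; split_ifs <;> decide

theorem pvMaskOf_le (facts : List String) : pvMaskOf facts ≤ 15 := by
  unfold pvMaskOf; split_ifs <;> decide

theorem pv_or_le15 (x y : Nat) (hx : x ≤ 15) (hy : y ≤ 15) : x ||| y ≤ 15 := by
  interval_cases x <;> interval_cases y <;> decide

theorem pv_or15 (x : Nat) (h : x ≤ 15) : 15 ||| x = 15 := by
  interval_cases x <;> decide

theorem pvMaskOf_cons (f : String) (fs : List String) :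
    pvMaskOf (f :: fs) = pvBits f ||| pvMaskOf fs := by
  unfold pvMaskOf pvBits
  simp only [List.any_cons, Bool.or_eq_true]
  cases h1 : PySem.Str.isIn "has-loop-structure" f <;>
    cases h2 : PySem.Str.isIn "has-comparison-ops" f <;>
    cases h3 : PySem.Str.isIn "has-return" f <;>
    cases h4 : PySem.Str.isIn "calls-self" f <;>
    cases h5 : fs.any (fun fact => PySem.Str.isIn "has-loop-structure" fact) <;>
    cases h6 : fs.any (fun fact => PySem.Str.isIn "has-comparison-ops" fact) <;>
    cases h7 : fs.any (fun fact => PySem.Str.isIn "has-return" fact) <;>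
    cases h8 : fs.any (fun fact => PySem.Str.isIn "calls-self" fact) <;>
    simp

-- the early break does not change the resulting mask
theorem pvScanMask_eq (facts : List String) :
    ∀ m : Nat, m ≤ 15 → pvScanMask facts m = m ||| pvMaskOf facts := by
  induction facts with
  | nil => intro m _; simp [pvScanMask, pvMaskOf]
  | cons f fs ih =>
    intro m hm
    show (if pvStep f m == 15 then pvStep f m else pvScanMask fs (pvStep f m))
        = m ||| pvMaskOf (f :: fs)
    rw [pvStep_eq, pvMaskOf_cons]
    by_cases h15 : m ||| pvBits f = 15
    · rw [h15, ← Nat.or_assoc, h15]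
      simp [pv_or15 _ (pvMaskOf_le fs)]
    · simp only [beq_iff_eq, h15, if_false]
      rw [ih _ (pv_or_le15 m (pvBits f) hm (pvBits_le f)), Nat.or_assoc]

-- ===== VERDICT (by name: the statement is the Claim_ definition above) =====
theorem detect_patterns_symbolically_py_spec : Claim_equal_detect_patterns_symbolically_py := by
  intro facts _
  unfold Spec_detect_patterns_symbolically_py detect_patterns_symbolically_py
    detect_patterns_symbolically_py_alt
  rw [pvScanMask_eq facts 0 (by decide), Nat.zero_or]
  unfold pvMaskOf
  cases facts.any (fun fact => PySem.Str.isIn "has-loop-structure" fact) <;>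
    cases facts.any (fun fact => PySem.Str.isIn "has-comparison-ops" fact) <;>
    cases facts.any (fun fact => PySem.Str.isIn "has-return" fact) <;>
    cases facts.any (fun fact => PySem.Str.isIn "calls-self" fact) <;>
    simp [pvTable]
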